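-- pv_equiv track=rewrite | github.com/hippolyterechard10-blip/Jim-bot | trading-agent/strategy.py | _suggest_action
-- ===== SOURCE A (Python) =====
-- def _suggest_action(patterns: list, score: int) -> str:
--     """Suggère une action basée sur les patterns détectés."""
--     if not patterns or score < 25:
--         return "hold"
--     buy_patterns  = {"GAPPER", "MOMENTUM_BULL", "BREAKOUT", "OVERSOLD_REVERSAL", "SCALP_OPPORTUNITY"}
--     sell_patterns = {"MOMENTUM_BEAR", "BREAKDOWN", "OVERBOUGHT_REVERSAL"}
--     buy_count  = sum(1 for p in patterns if p in buy_patterns)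
--     sell_count = sum(1 for p in patterns if p in sell_patterns)
--     if buy_count > sell_count:
--         return "buy"
--     elif sell_count > buy_count:
--         return "sell"
--     return "hold"
-- ===== SOURCE B (Python) =====
-- _WEIGHT = {
--     "GAPPER": 1, "MOMENTUM_BULL": 1, "BREAKOUT": 1,
--     "OVERSOLD_REVERSAL": 1, "SCALP_OPPORTUNITY": 1,
--     "MOMENTUM_BEAR": -1, "BREAKDOWN": -1, "OVERBOUGHT_REVERSAL": -1,
-- }
--
-- def _suggest_action(patterns: list, score: int) -> str:
--     if not patterns or score < 25:
--         return "hold"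
--     net = 0
--     for p in patterns:
--         net += _WEIGHT.get(p, 0)
--     if net > 0:
--         return "buy"
--     if net < 0:
--         return "sell"
--     return "hold"
-- ===== Notes on version B (the rewrite author's own statement) =====
-- stated objective: simpler
-- what changed: Replaced the two separate membership-counting passes over patterns with a single pass accumulating one signed net from a +1/-1 weight dict; the sign of the net decides buy/sell/hold.
import Mathlib
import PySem

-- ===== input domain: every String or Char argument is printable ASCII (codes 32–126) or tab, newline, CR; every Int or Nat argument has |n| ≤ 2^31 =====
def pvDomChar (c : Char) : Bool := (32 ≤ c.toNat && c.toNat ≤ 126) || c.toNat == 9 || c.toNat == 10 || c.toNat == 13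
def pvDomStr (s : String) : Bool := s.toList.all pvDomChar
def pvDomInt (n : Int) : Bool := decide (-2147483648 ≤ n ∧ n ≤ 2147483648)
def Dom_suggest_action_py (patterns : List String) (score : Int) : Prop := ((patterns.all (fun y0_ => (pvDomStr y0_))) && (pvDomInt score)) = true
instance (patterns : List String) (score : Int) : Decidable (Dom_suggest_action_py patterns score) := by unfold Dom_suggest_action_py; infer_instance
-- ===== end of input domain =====

-- B replaces A's two membership-count passes with one pass summing a signed weight per pattern (objective: simpler).

-- ===== PORT A =====
def pvBuyPatterns : PySem.Set String :=
  PySem.Set.ofList ["GAPPER", "MOMENTUM_BULL", "BREAKOUT", "OVERSOLD_REVERSAL", "SCALP_OPPORTUNITY"]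
def pvSellPatterns : PySem.Set String :=
  PySem.Set.ofList ["MOMENTUM_BEAR", "BREAKDOWN", "OVERBOUGHT_REVERSAL"]

def suggest_action_py (patterns : List String) (score : Int) : String :=
  if patterns = [] ∨ score < 25 then "hold"
  else
    let buy_count : Int := patterns.foldl (fun acc p => if p ∈ pvBuyPatterns then acc + 1 else acc) 0
    let sell_count : Int := patterns.foldl (fun acc p => if p ∈ pvSellPatterns then acc + 1 else acc) 0
    if buy_count > sell_count then "buy"
    else if sell_count > buy_count then "sell"
    else "hold"

-- ===== PORT B =====
def pvWeight : PySem.Dict String Int :=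
  PySem.Dict.ofList
    [("GAPPER", 1), ("MOMENTUM_BULL", 1), ("BREAKOUT", 1),
     ("OVERSOLD_REVERSAL", 1), ("SCALP_OPPORTUNITY", 1),
     ("MOMENTUM_BEAR", -1), ("BREAKDOWN", -1), ("OVERBOUGHT_REVERSAL", -1)]

def suggest_action_py_alt (patterns : List String) (score : Int) : String :=
  if patterns = [] ∨ score < 25 then "hold"
  else
    let net : Int := patterns.foldl (fun acc p => acc + pvWeight.getD p 0) 0
    if net > 0 then "buy"
    else if net < 0 then "sell"
    else "hold"

-- ===== PRECONDITION & SPEC =====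
def Spec_suggest_action_py (patterns : List String) (score : Int) (out : String) : Prop := out = suggest_action_py_alt patterns score
instance (patterns : List String) (score : Int) (out : String) : Decidable (Spec_suggest_action_py patterns score out) := by unfold Spec_suggest_action_py; infer_instance

-- ===== CLAIM (what is proved, stated in full; the proofs are below) =====
def Claim_equal_suggest_action_py : Prop := ∀ (patterns : List String) (score : Int), Dom_suggest_action_py patterns score → Spec_suggest_action_py patterns score (suggest_action_py patterns score)

-- ===== LEMMAS AND PROOFS =====

-- the per-element weight is exactly the buy-membership indicator minus the sell-membership indicator
theorem pv_weight_eq (p : String) :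
    pvWeight.getD p 0
      = (if p ∈ pvBuyPatterns then (1 : Int) else 0) - (if p ∈ pvSellPatterns then (1 : Int) else 0) := by
  by_cases h1 : p = "GAPPER"; · subst h1; decide
  by_cases h2 : p = "MOMENTUM_BULL"; · subst h2; decide
  by_cases h3 : p = "BREAKOUT"; · subst h3; decide
  by_cases h4 : p = "OVERSOLD_REVERSAL"; · subst h4; decide
  by_cases h5 : p = "SCALP_OPPORTUNITY"; · subst h5; decide
  by_cases h6 : p = "MOMENTUM_BEAR"; · subst h6; decide
  by_cases h7 : p = "BREAKDOWN"; · subst h7; decide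
  by_cases h8 : p = "OVERBOUGHT_REVERSAL"; · subst h8; decide
  have hb : p ∉ pvBuyPatterns := by
    simp [pvBuyPatterns, PySem.Set.ofList, h1, h2, h3, h4, h5]
  have hs : p ∉ pvSellPatterns := by
    simp [pvSellPatterns, PySem.Set.ofList, h6, h7, h8]
  have hw : pvWeight.getD p 0 = 0 := by
    apply PySem.Dict.getD_of_not_contains
    rw [show pvWeight = PySem.Dict.mk
      [("GAPPER", 1), ("MOMENTUM_BULL", 1), ("BREAKOUT", 1),
       ("OVERSOLD_REVERSAL", 1), ("SCALP_OPPORTUNITY", 1),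
       ("MOMENTUM_BEAR", -1), ("BREAKDOWN", -1), ("OVERBOUGHT_REVERSAL", -1)] from by decide]
    simp [PySem.Dict.contains_eq_decide_mem_keys, h1, h2, h3, h4, h5, h6, h7, h8]
  simp [hw, hb, hs]

-- the net fold equals the buy fold minus the sell fold, for any starting accumulators
theorem pv_net_eq (l : List String) (b s : Int) :
    l.foldl (fun acc p => acc + pvWeight.getD p 0) (b - s)
      = l.foldl (fun acc p => if p ∈ pvBuyPatterns then acc + 1 else acc) b
        - l.foldl (fun acc p => if p ∈ pvSellPatterns then acc + 1 else acc) s := by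
  induction l generalizing b s with
  | nil => simp
  | cons p t ih =>
    simp only [List.foldl_cons]
    rw [pv_weight_eq p]
    by_cases hb : p ∈ pvBuyPatterns <;> by_cases hs : p ∈ pvSellPatterns <;>
      simp only [hb, hs, if_true, if_false] <;>
      first
      | (rw [show b - s + (1 - 1) = b + 1 - (s + 1) by ring]; exact ih (b + 1) (s + 1))
      | (rw [show b - s + (1 - 0) = b + 1 - s by ring]; exact ih (b + 1) s)
      | (rw [show b - s + (0 - 1) = b - (s + 1) by ring]; exact ih b (s + 1))
      | (rw [show b - s + (0 - 0) = b - s by ring]; exact ih b s)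

-- ===== VERDICT (by name: the statement is the Claim_ definition above) =====
theorem suggest_action_py_spec : Claim_equal_suggest_action_py := by
  intro patterns score _
  unfold Spec_suggest_action_py suggest_action_py suggest_action_py_alt
  by_cases hguard : patterns = [] ∨ score < 25
  · simp [hguard]
  · simp only [hguard, if_false]
    have hnet := pv_net_eq patterns 0 0
    rw [show (0 : Int) - 0 = 0 by ring] at hnet
    rw [hnet]
    split_ifs <;> first | rfl | omega
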